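-- pv_equiv track=rewrite | github.com/Ian-All/Python | Minimax_best_move.py | identify_locations
-- ===== SOURCE A (Python) =====
-- def identify_locations(board):
--     x_locations=[]
--     o_locations=[]
--     free_locations=[]
--     index=0
--
--     for i in board:
--         if i=='X':
--             x_locations+=[index]
--         elif i=='O':
--             o_locations+=[index]
--         else:
--             free_locations+=[index]
--         index+=1
--
--     return x_locations,o_locations,free_locations
-- ===== SOURCE B (Python) =====
-- def identify_locations(board):
--     x_locations = [i for i, v in enumerate(board) if v == 'X']
--     o_locations = [i for i, v in enumerate(board) if v == 'O']
--     free_locations = [i for i, v in enumerate(board) if v != 'X' and v != 'O']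
--     return x_locations, o_locations, free_locations
-- ===== Notes on version B (the rewrite author's own statement) =====
-- stated objective: idiomatic
-- what changed: Replaced the single classifying loop with a manual index counter by three independent list comprehensions over enumerate(board), one per category.
import Mathlib
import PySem

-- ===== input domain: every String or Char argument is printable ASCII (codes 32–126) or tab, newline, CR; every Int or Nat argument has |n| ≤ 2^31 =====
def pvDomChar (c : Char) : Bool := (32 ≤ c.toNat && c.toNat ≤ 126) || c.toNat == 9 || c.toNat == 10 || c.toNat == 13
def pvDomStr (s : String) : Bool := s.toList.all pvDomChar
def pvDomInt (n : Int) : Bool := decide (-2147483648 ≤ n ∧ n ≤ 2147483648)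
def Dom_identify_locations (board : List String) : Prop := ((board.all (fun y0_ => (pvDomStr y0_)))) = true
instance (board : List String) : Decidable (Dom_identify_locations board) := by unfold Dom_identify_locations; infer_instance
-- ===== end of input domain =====

-- B replaces A's single classifying loop (manual index counter, three accumulators) by three
-- independent comprehensions over enumerate(board), one per category (idiomatic; same cost).

-- ===== PORT A =====
-- single pass: state = (x_locations, o_locations, free_locations, index)
def identify_locations (board : List String) : List Int × List Int × List Int :=
  let st := board.foldl
    (fun (st : List Int × List Int × List Int × Int) i =>
      let (xl, ol, fl, idx) := st
      if i = "X" then (xl ++ [idx], ol, fl, idx + 1)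
      else if i = "O" then (xl, ol ++ [idx], fl, idx + 1)
      else (xl, ol, fl ++ [idx], idx + 1))
    ([], [], [], 0)
  (st.1, st.2.1, st.2.2.1)

-- ===== PORT B =====
-- three comprehensions over enumerate(board)
def identify_locations_alt (board : List String) : List Int × List Int × List Int :=
  ( ((PySem.List.enumerate board).filter (fun p => p.2 = "X")).map (·.1)
  , ((PySem.List.enumerate board).filter (fun p => p.2 = "O")).map (·.1)
  , ((PySem.List.enumerate board).filter (fun p => p.2 ≠ "X" ∧ p.2 ≠ "O")).map (·.1) )

-- ===== PRECONDITION & SPEC =====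
def Spec_identify_locations (board : List String) (out : List Int × List Int × List Int) : Prop := out = identify_locations_alt board
instance (board : List String) (out : List Int × List Int × List Int) : Decidable (Spec_identify_locations board out) := by unfold Spec_identify_locations; infer_instance

-- ===== CLAIM (what is proved, stated in full; the proofs are below) =====
def Claim_equal_identify_locations : Prop := ∀ (board : List String), Dom_identify_locations board → Spec_identify_locations board (identify_locations board)

-- ===== LEMMAS AND PROOFS =====

def pvComp (board : List String) (p : String → Bool) (s : Int) : List Int :=
  ((PySem.List.enumerate board (start := s)).filter (fun q => p q.2)).map (·.1)

theorem pvComp_nil (p : String → Bool) (s : Int) : pvComp [] p s = [] := rfl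

theorem pvComp_cons (x : String) (xs : List String) (p : String → Bool) (s : Int) :
    pvComp (x :: xs) p s = (if p x then [s] else []) ++ pvComp xs p (s + 1) := by
  simp only [pvComp, PySem.List.enumerate_cons, List.filter]
  cases hpx : p x <;> simp

theorem identify_locations_loop (board : List String)
    (xl ol fl : List Int) (s : Int) :
    board.foldl
      (fun (st : List Int × List Int × List Int × Int) i =>
        let (xl, ol, fl, idx) := st
        if i = "X" then (xl ++ [idx], ol, fl, idx + 1)
        else if i = "O" then (xl, ol ++ [idx], fl, idx + 1)
        else (xl, ol, fl ++ [idx], idx + 1))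
      (xl, ol, fl, s)
    = ( xl ++ pvComp board (fun v => v = "X") s
      , ol ++ pvComp board (fun v => v = "O") s
      , fl ++ pvComp board (fun v => ¬ (v = "X") ∧ ¬ (v = "O")) s
      , s + board.length ) := by
  induction board generalizing xl ol fl s with
  | nil => simp [pvComp_nil]
  | cons h t ih =>
    simp only [List.foldl_cons]
    by_cases hX : h = "X"
    · simp [hX, ih, pvComp_cons, List.append_assoc]
      omega
    · by_cases hO : h = "O"
      · simp [hO, ih, pvComp_cons, List.append_assoc]
        omega
      · simp [hX, hO, ih, pvComp_cons, List.append_assoc]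
        omega

-- ===== VERDICT (by name: the statement is the Claim_ definition above) =====
theorem identify_locations_spec : Claim_equal_identify_locations := by
  intro board _
  unfold Spec_identify_locations identify_locations identify_locations_alt
  simp only [identify_locations_loop board [] [] [] 0]
  simp [pvComp]
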